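-- pv_equiv track=rewrite | github.com/TanmayEL/neetcode-submissions-m8guttg6 | Data Structures & Algorithms/append-characters-to-string-to-make-subsequence/submission-1.py | appendCharacters
-- ===== SOURCE A (Python) =====
-- def appendCharacters(s: str, t: str) -> int:
--     l, r = 0, 0
--     len_s, len_t = len(s), len(t)
--
--     while l < len_s and r < len_t:
--         if l < len_s and s[l] == t[r]:
--             l += 1
--             r += 1
--         else:
--             l += 1
--
--     return len_t - r
-- ===== SOURCE B (Python) =====
-- def appendCharacters(s: str, t: str) -> int:
--     # Subsequence automaton: nxt[i] maps each character ch to the smallest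
--     # index j >= i with s[j] == ch; built back-to-front, then t is walked
--     # with O(1) dictionary lookups per character.
--     nxt = [{}]
--     for i in range(len(s) - 1, -1, -1):
--         d = dict(nxt[-1])
--         d[s[i]] = i
--         nxt.append(d)
--     nxt.reverse()
--     cur = 0
--     r = 0
--     for ch in t:
--         j = nxt[cur].get(ch)
--         if j is None:
--             break
--         cur = j + 1
--         r += 1
--     return len(t) - r
-- ===== Notes on version B (the rewrite author's own statement) =====
-- stated objective: alternative
-- what changed: Replaced the single-pass two-pointer scan of s with a subsequence automaton: a preprocessing pass builds, back to front, a next-occurrence table nxt[i] (char -> smallest j >= i with s[j]==ch), and a second pass walks t jumping through s via O(1) table lookups instead of scanning characters of s.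
import Mathlib
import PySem

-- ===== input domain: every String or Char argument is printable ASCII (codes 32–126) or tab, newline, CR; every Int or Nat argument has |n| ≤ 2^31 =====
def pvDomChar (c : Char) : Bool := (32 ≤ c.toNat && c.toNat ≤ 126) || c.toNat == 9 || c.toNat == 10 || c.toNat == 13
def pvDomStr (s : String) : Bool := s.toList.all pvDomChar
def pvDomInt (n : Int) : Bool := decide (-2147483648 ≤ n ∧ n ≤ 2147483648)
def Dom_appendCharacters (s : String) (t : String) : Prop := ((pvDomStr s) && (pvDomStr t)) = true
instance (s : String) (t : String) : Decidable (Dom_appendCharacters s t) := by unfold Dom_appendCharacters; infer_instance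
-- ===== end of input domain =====

-- B replaces A's two-pointer scan with a subsequence automaton (next-occurrence
-- tables built back to front, then t walked by table lookups); alternative, not faster.


-- ===== PORT A =====
-- A's while loop: cursor l over s, cursor r over t; modelled as structural
-- recursion on the remainder of s (l advances every iteration).
def pvALoop : List Char → List Char → Int
  | [], _ => 0
  | _, [] => 0
  | a :: sl, b :: tl => if a = b then 1 + pvALoop sl tl else pvALoop sl (b :: tl)

def appendCharacters (s : String) (t : String) : Int :=
  (t.toList.length : Int) - pvALoop s.toList t.toList

-- ===== PORT B =====
-- B's preprocessing loop runs i from len(s)-1 down to 0, appending to nxt the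
-- copy of the previous table (nxt[-1]) updated with s[i] ↦ i, and finally
-- reverses nxt.  Ported as structural recursion on s with the offset i: the
-- recursive call computes the tables of the suffix first (= the iterations for
-- larger i) and consing the new head table produces the reversed order directly.
def pvTabs : List Char → Int → List (PySem.Dict Char Int)
  | [], _ => [PySem.Dict.empty]
  | c :: rest, i =>
    let ds := pvTabs rest (i + 1)
    (ds.headD PySem.Dict.empty).insert c i :: ds

-- B's for-loop over t: j = nxt[cur].get(ch); break on None, else cur = j+1.
-- (the pyGet? none branch is unreachable: 0 ≤ cur ≤ len(s) and nxt has len(s)+1 tables)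
def pvBLoop (nxt : List (PySem.Dict Char Int)) : Int → List Char → Int
  | _, [] => 0
  | cur, ch :: tl =>
    match PySem.List.pyGet? nxt cur with
    | none => 0
    | some d =>
      match d.get? ch with
      | none => 0
      | some j => 1 + pvBLoop nxt (j + 1) tl

def appendCharacters_alt (s : String) (t : String) : Int :=
  (t.toList.length : Int) - pvBLoop (pvTabs s.toList 0) 0 t.toList

-- ===== PRECONDITION & SPEC =====
def Spec_appendCharacters (s : String) (t : String) (out : Int) : Prop := out = appendCharacters_alt s t
instance (s : String) (t : String) (out : Int) : Decidable (Spec_appendCharacters s t out) := by unfold Spec_appendCharacters; infer_instance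

-- ===== CLAIM (what is proved, stated in full; the proofs are below) =====
def Claim_equal_appendCharacters : Prop := ∀ (s : String) (t : String), Dom_appendCharacters s t → Spec_appendCharacters s t (appendCharacters s t)

-- ===== LEMMAS AND PROOFS =====

-- positions (0-based) of ch in a list, in increasing order
def pvNatPos (ch : Char) : List Char → List Nat
  | [] => []
  | c :: rest => if c = ch then 0 :: (pvNatPos ch rest).map (· + 1) else (pvNatPos ch rest).map (· + 1)

theorem pvNatPos_lt_length (ch : Char) (l : List Char) : ∀ p ∈ pvNatPos ch l, p < l.length := by
  induction l with
  | nil => simp [pvNatPos]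
  | cons c rest ih =>
    intro p hp
    by_cases h : c = ch <;> simp [pvNatPos, h] at hp
    · rcases hp with rfl | ⟨q, hq, rfl⟩
      · simp
      · simpa using Nat.succ_lt_succ (ih q hq)
    · rcases hp with ⟨q, hq, rfl⟩
      simpa using Nat.succ_lt_succ (ih q hq)

-- A's loop on t = ch :: tl, characterised by the first position of ch
theorem pvALoop_cons (b : Char) (tl : List Char) (sl : List Char) :
    pvALoop sl (b :: tl) =
      match (pvNatPos b sl).head? with
      | none => 0
      | some k => 1 + pvALoop (sl.drop (k + 1)) tl := by
  induction sl with
  | nil => simp [pvALoop, pvNatPos]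
  | cons c rest ih =>
    by_cases h : c = b
    · simp [pvALoop, pvNatPos, h]
    · simp only [pvALoop, if_neg h, ih, pvNatPos]
      cases hh : (pvNatPos b rest).head? <;> simp [hh, List.head?_map]

theorem pvTabs_length (sl : List Char) : ∀ i, (pvTabs sl i).length = sl.length + 1 := by
  induction sl with
  | nil => intro i; simp [pvTabs]
  | cons c rest ih => intro i; simp [pvTabs, ih]

-- the k-th table of pvTabs sl i answers ch with the first position of ch in sl.drop k, shifted
-- the k-th table of pvTabs sl i answers ch with the first position of ch in sl.drop k, shifted
theorem pvTabs_lookup (ch : Char) (sl : List Char) : ∀ (i : Int) (k : Nat), k ≤ sl.length →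
    (pvTabs sl i)[k]?.bind (fun d => d.get? ch) =
      ((pvNatPos ch (sl.drop k)).head?).map (fun p : Nat => i + (k : Int) + (p : Int)) := by
  induction sl with
  | nil =>
    intro i k hk
    have hk0 : k = 0 := Nat.le_zero.mp hk
    subst hk0
    simp [pvTabs, pvNatPos, PySem.Dict.get?_empty]
  | cons c rest ih =>
    intro i k hk
    cases k with
    | zero =>
      have hne : pvTabs rest (i + 1) ≠ [] := by
        have := pvTabs_length rest (i + 1); intro h; rw [h] at this; simp at this
      have hhead : (pvTabs rest (i + 1))[0]? = some ((pvTabs rest (i + 1)).headD PySem.Dict.empty) := by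
        cases hds : pvTabs rest (i + 1) with
        | nil => exact absurd hds hne
        | cons d ds => simp
      have h0 := ih (i + 1) 0 (Nat.zero_le _)
      rw [hhead] at h0
      simp only [Option.bind_some, List.drop_zero, Nat.cast_zero, add_zero] at h0
      by_cases h : ch = c
      · subst h
        simp [pvTabs, PySem.Dict.get?_insert_self, pvNatPos]
      · simp only [pvTabs, List.getElem?_cons_zero, Option.bind_some,
          PySem.Dict.get?_insert_of_ne _ _ h, h0, List.drop_zero]
        rw [pvNatPos, if_neg (show ¬ c = ch from fun hh => h hh.symm)]
        cases hh : (pvNatPos ch rest).head? <;>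
          simp [hh, List.head?_map] <;> omega
    | succ k' =>
      have hk' : k' ≤ rest.length := by simpa using hk
      simp only [pvTabs, List.getElem?_cons_succ, ih (i + 1) k' hk', List.drop_succ_cons]
      cases hh : (pvNatPos ch (rest.drop k')).head? <;> simp [hh] <;> omega

theorem pvLoops_eq (sl : List Char) (tl : List Char) : ∀ (k : Nat), k ≤ sl.length →
    pvBLoop (pvTabs sl 0) (k : Int) tl = pvALoop (sl.drop k) tl := by
  induction tl with
  | nil => intro k _; cases sl.drop k <;> simp [pvBLoop, pvALoop]
  | cons ch tl ih =>
    intro k hk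
    have hkl : k < (pvTabs sl 0).length := by rw [pvTabs_length]; omega
    have hget : PySem.List.pyGet? (pvTabs sl 0) (k : Int) = some (pvTabs sl 0)[k] := by
      rw [PySem.List.pyGet?_natCast, List.getElem?_eq_getElem hkl]
    have hlook := pvTabs_lookup ch sl 0 k hk
    rw [List.getElem?_eq_getElem hkl] at hlook
    simp only [Option.bind_some] at hlook
    rw [pvALoop_cons]
    cases hh : (pvNatPos ch (sl.drop k)).head? with
    | none =>
      rw [hh] at hlook
      simp only [Option.map_none] at hlook
      simp [pvBLoop, hget, hlook]
    | some p =>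
      rw [hh] at hlook
      simp only [Option.map_some, zero_add] at hlook
      have hp : p < (sl.drop k).length :=
        pvNatPos_lt_length ch _ p (List.mem_of_mem_head? hh)
      have hp' : k + p + 1 ≤ sl.length := by
        rw [List.length_drop] at hp; omega
      simp only [pvBLoop, hget, hlook]
      rw [List.drop_drop,
        show ((k : Int) + p + 1) = ((k + p + 1 : Nat) : Int) by push_cast; ring,
        ih (k + p + 1) hp',
        show k + (p + 1) = k + p + 1 by omega]

-- ===== VERDICT (by name: the statement is the Claim_ definition above) =====
theorem appendCharacters_spec : Claim_equal_appendCharacters := by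
  intro s t _
  unfold Spec_appendCharacters appendCharacters appendCharacters_alt
  have := pvLoops_eq s.toList t.toList 0 (Nat.zero_le _)
  simp only [Nat.cast_zero, List.drop_zero] at this
  rw [this]
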